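-- pv_equiv track=rewrite | github.com/whisoo98/ProblemSolving | 백준/Gold/3687. 성냥개비/성냥개비.py | Big
-- ===== SOURCE A (Python) =====
-- def Big(n):
--     ans= ''
--     temp = n
--     while temp>3:
--         temp -= 2
--         ans += '1'
--     if temp==2:
--         ans += '1'
--     else:
--         ans = '7' + ans
--     return ans
-- ===== SOURCE B (Python) =====
-- def Big(n):
--     if n % 2 == 0:
--         return '1' * (n // 2)
--     return '7' + '1' * ((n - 3) // 2)
-- ===== Notes on version B (the rewrite author's own statement) =====
-- stated objective: faster
-- what changed: Replace the subtract-two loop with repeated string concatenation by a closed-form digit count and a single string multiplication.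
-- intended difference: On even nonpositive inputs A returns its leftover else-branch digit seven although no digit is formable from zero or negative matchsticks, while B returns the empty string, the intended value. — e.g. on Big(0): A returns "7", B returns ""
import Mathlib
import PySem

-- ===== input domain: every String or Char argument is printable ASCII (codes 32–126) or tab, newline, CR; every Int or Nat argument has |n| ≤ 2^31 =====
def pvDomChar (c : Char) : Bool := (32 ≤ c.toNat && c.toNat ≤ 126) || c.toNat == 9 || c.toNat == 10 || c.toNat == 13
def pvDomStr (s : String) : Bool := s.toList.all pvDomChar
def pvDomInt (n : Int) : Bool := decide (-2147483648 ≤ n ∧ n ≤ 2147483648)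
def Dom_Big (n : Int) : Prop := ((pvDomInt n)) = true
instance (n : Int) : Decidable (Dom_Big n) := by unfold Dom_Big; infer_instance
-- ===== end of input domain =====

-- B replaces A's subtract-2 loop of repeated concatenations by a closed-form digit count and one replicate ("string multiplication").

-- ===== PORT A =====
-- while temp>3: temp -= 2; ans += '1'
def BigLoop (temp : Int) (ans : List Char) : Int × List Char :=
  if temp > 3 then BigLoop (temp - 2) (ans ++ ['1']) else (temp, ans)
termination_by (temp - 3).toNat
decreasing_by omega

def Big (n : Int) : String :=
  let p := BigLoop n []
  if p.1 = 2 then String.mk (p.2 ++ ['1']) else String.mk ('7' :: p.2)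

-- ===== PORT B =====
def Big_alt (n : Int) : String :=
  if PySem.Int.mod n 2 = 0 then String.mk (List.replicate (PySem.Int.floordiv n 2).toNat '1')
  else String.mk ('7' :: List.replicate (PySem.Int.floordiv (n - 3) 2).toNat '1')

-- ===== PRECONDITION & SPEC =====
-- On even nonpositive inputs A returns its leftover else-branch digit seven although no digit is formable from zero or negative matchsticks, while B returns the empty string, the intended value.
def D_Big (n : Int) : Prop := n ≤ 0 ∧ n % 2 = 0
instance (n : Int) : Decidable (D_Big n) := by unfold D_Big; infer_instance
def Spec_Big (n : Int) (out : String) : Prop := ¬ D_Big n → out = Big_alt n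
instance (n : Int) (out : String) : Decidable (Spec_Big n out) := by unfold Spec_Big; infer_instance
def pvDiffWitness_Big : Int := 0
def pvDiffWitnessOut_Big : String × String := ("7", "")

-- ===== CLAIM (what is proved, stated in full; the proofs are below) =====
def Claim_unchanged_Big : Prop := ∀ (n : Int), Dom_Big n → Spec_Big n (Big n)
def Claim_changed_Big : Prop := Dom_Big (pvDiffWitness_Big) ∧ D_Big (pvDiffWitness_Big) ∧ Big (pvDiffWitness_Big) = pvDiffWitnessOut_Big.1 ∧ Big_alt (pvDiffWitness_Big) = pvDiffWitnessOut_Big.2 ∧ pvDiffWitnessOut_Big.1 ≠ pvDiffWitnessOut_Big.2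
def Claim_exact_Big : Prop := ∀ (n : Int), Dom_Big n → D_Big n → Big n ≠ Big_alt n

-- ===== LEMMAS AND PROOFS =====

-- closed form of A's loop: result temp and the number of '1's appended
lemma bigLoop_spec (temp : Int) (ans : List Char) :
    BigLoop temp ans =
      ((if temp > 3 then (if temp % 2 = 0 then 2 else 3) else temp),
       ans ++ List.replicate ((temp - 2).toNat / 2) '1') := by
  induction temp, ans using BigLoop.induct with
  | case1 temp ans h ih =>
    rw [BigLoop, if_pos h, ih]
    have hk : (temp - 2).toNat / 2 = (temp - 2 - 2).toNat / 2 + 1 := by omega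
    refine Prod.ext ?_ ?_
    · simp only
      split_ifs <;> omega
    · simp only [hk, List.replicate_succ, List.append_assoc, List.singleton_append]
  | case2 temp ans h =>
    rw [BigLoop, if_neg h]
    have hk : (temp - 2).toNat / 2 = 0 := by omega
    refine Prod.ext ?_ ?_
    · simp only; split_ifs <;> omega
    · simp [hk]

lemma big_eq_alt_of_not_D (n : Int) (hnd : ¬ D_Big n) : Big n = Big_alt n := by
  have hm : PySem.Int.mod n 2 = n % 2 := PySem.Int.mod_eq_emod_of_pos (by omega)
  have hd : PySem.Int.floordiv n 2 = n / 2 := PySem.Int.floordiv_eq_ediv_of_pos (by omega)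
  have hd3 : PySem.Int.floordiv (n - 3) 2 = (n - 3) / 2 := PySem.Int.floordiv_eq_ediv_of_pos (by omega)
  simp only [Big, Big_alt, bigLoop_spec, List.nil_append, hm, hd, hd3]
  by_cases he : n % 2 = 0
  · -- even; ¬D gives n ≥ 1, hence n ≥ 2
    have hn2 : 2 ≤ n := by
      rcases not_and_or.mp hnd with h | h
      · omega
      · exact absurd he h
    have hc : (if n > 3 then (if n % 2 = 0 then (2:Int) else 3) else n) = 2 := by
      split_ifs <;> omega
    have hk : (n - 2).toNat / 2 + 1 = (n / 2).toNat := by omega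
    rw [hc, if_pos rfl, if_pos he, ← hk, ← List.replicate_succ']
  · -- odd
    have hc : (if n > 3 then (if n % 2 = 0 then (2:Int) else 3) else n) ≠ 2 := by
      split_ifs <;> omega
    have hk : (n - 2).toNat / 2 = ((n - 3) / 2).toNat := by omega
    rw [if_neg hc, if_neg he, hk]

theorem Big_spec : Claim_unchanged_Big := by
  intro n _ hnd
  exact big_eq_alt_of_not_D n hnd

theorem Big_changed : Claim_changed_Big := by
  unfold Claim_changed_Big
  refine ⟨by decide, by decide, ?_, by decide, by decide⟩
  show Big 0 = "7"
  simp only [Big, bigLoop_spec]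
  decide

theorem Big_tight : Claim_exact_Big := by
  intro n _ hD
  obtain ⟨hle, he⟩ := hD
  have h7 : Big n = String.mk ['7'] := by
    have hc : (if n > 3 then (if n % 2 = 0 then (2:Int) else 3) else n) ≠ 2 := by
      split_ifs <;> omega
    have hk : (n - 2).toNat / 2 = 0 := by omega
    simp only [Big, bigLoop_spec, List.nil_append, hk, List.replicate_zero,
      List.append_nil]
    rw [if_neg hc]
  have hmt : String.mk [] = Big_alt n := by
    have hm : PySem.Int.mod n 2 = n % 2 := PySem.Int.mod_eq_emod_of_pos (by omega)
    have hk : (PySem.Int.floordiv n 2).toNat = 0 := by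
      rw [PySem.Int.floordiv_eq_ediv_of_pos (by omega)]; omega
    simp only [Big_alt, hm]
    rw [if_pos he, hk, List.replicate_zero]
  rw [h7, ← hmt]
  decide
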